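-- pv_equiv track=rewrite | github.com/Zayakind/learn_development | 2_odometr.py | odometr
-- ===== SOURCE A (Python) =====
-- def odometr(oksana: list[int]) -> int:
--     result = 0
--
--     for hour in range(1, len(oksana), 2):
--         if hour != 1:
--             summ_hour = oksana[hour-1] * (oksana[hour] - oksana[hour-2])
--         else:
--             summ_hour = oksana[hour-1] * oksana[hour]
--         result += summ_hour
--     return result
-- ===== SOURCE B (Python) =====
-- def odometr(oksana: list[int]) -> int:
--     # Summation by parts: instead of summing weight*(reading - previous_reading),
--     # deinterleave the list into weights (even positions) and readings (odd
--     # positions), drop any unpaired trailing weight, and use the algebraic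
--     # identity  sum w_k*(r_k - r_{k-1})  =  dot(rs, ws) - dot(rs, ws[1:])
--     # (the telescoped previous-reading differences become weight differences).
--     ws = [x for i, x in enumerate(oksana) if i % 2 == 0]
--     rs = [x for i, x in enumerate(oksana) if i % 2 == 1]
--     ws = ws[:len(rs)]
--     return sum(r * w for r, w in zip(rs, ws)) - sum(r * w for r, w in zip(rs, ws[1:]))
-- ===== Notes on version B (the rewrite author's own statement) =====
-- stated objective: alternative
-- what changed: Replaces the single indexed loop with back-references oksana[hour-2] and a first-iteration branch by summation by parts: deinterleave the list into weights/readings via parity-filtered enumerate, then compute dot(readings, weights) - dot(readings, weights[1:]), so no pass ever looks at a previous reading.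
import Mathlib
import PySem

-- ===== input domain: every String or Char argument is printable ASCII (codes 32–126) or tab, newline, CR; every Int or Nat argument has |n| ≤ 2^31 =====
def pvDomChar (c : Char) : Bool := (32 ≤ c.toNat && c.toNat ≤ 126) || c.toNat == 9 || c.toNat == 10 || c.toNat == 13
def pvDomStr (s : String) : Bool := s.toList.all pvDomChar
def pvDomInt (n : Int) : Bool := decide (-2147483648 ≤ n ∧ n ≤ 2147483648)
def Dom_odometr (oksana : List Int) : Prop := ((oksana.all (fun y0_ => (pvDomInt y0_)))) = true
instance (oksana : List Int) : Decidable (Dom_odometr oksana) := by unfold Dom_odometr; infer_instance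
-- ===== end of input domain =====

-- B replaces A's indexed odd-position loop (with its first-iteration special case) by
-- summation by parts over the deinterleaved weights/readings: dot(rs,ws) - dot(rs,ws[1:]).

-- ===== PORT A =====
-- every index A uses (hour, hour-1, hour-2 for hour in range(1, len, 2)) is in range,
-- so Python never raises; pyGetD's default 0 is never read.
def odometr (oksana : List Int) : Int :=
  (PySem.List.pyRange 1 oksana.length 2).foldl
    (fun result hour =>
      let summ_hour :=
        if hour ≠ 1 then
          PySem.List.pyGetD oksana (hour - 1) 0 *
            (PySem.List.pyGetD oksana hour 0 - PySem.List.pyGetD oksana (hour - 2) 0)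
        else
          PySem.List.pyGetD oksana (hour - 1) 0 * PySem.List.pyGetD oksana hour 0
      result + summ_hour) 0

-- ===== PORT B =====
-- Source B step for step: parity-filter comprehensions over enumerate, ws[:len(rs)],
-- and two generator-expression sums over zips (the second over ws[1:]).
def odometr_alt (oksana : List Int) : Int :=
  let ws0 := ((PySem.List.enumerate oksana).filter (fun p => PySem.Int.mod p.1 2 == 0)).map (·.2)
  let rs := ((PySem.List.enumerate oksana).filter (fun p => PySem.Int.mod p.1 2 == 1)).map (·.2)
  let ws := PySem.List.slice ws0 none (some (rs.length : Int))
  ((rs.zip ws).map (fun p => p.1 * p.2)).sum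
    - ((rs.zip (PySem.List.slice ws (some 1) none)).map (fun p => p.1 * p.2)).sum

-- ===== PRECONDITION & SPEC =====
def Spec_odometr (oksana : List Int) (out : Int) : Prop := out = odometr_alt oksana
instance (oksana : List Int) (out : Int) : Decidable (Spec_odometr oksana out) := by unfold Spec_odometr; infer_instance

-- ===== CLAIM (what is proved, stated in full; the proofs are below) =====
def Claim_equal_odometr : Prop := ∀ (oksana : List Int), Dom_odometr oksana → Spec_odometr oksana (odometr oksana)

-- ===== LEMMAS AND PROOFS =====

-- the common mathematical value: sum of weight * (reading - previous reading)
def gOdo : List Int → Int → Int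
  | w :: r :: t, prev => w * (r - prev) + gOdo t r
  | _, _ => 0

-- structural deinterleavers and B's value restated over them
def evensOf : List Int → List Int
  | a :: _ :: t => a :: evensOf t
  | [a] => [a]
  | [] => []

def oddsOf : List Int → List Int
  | _ :: b :: t => b :: oddsOf t
  | _ => []

def dotP (rs ws : List Int) : Int := ((rs.zip ws).map (fun p => p.1 * p.2)).sum

def altB (xs : List Int) : Int :=
  dotP (oddsOf xs) ((evensOf xs).take (oddsOf xs).length)
    - dotP (oddsOf xs) ((evensOf xs).take (oddsOf xs).length).tail

def fwt : List Int → Int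
  | a :: _ :: _ => a
  | _ => 0

theorem enum_shift (t : List Int) (s : Int) :
    PySem.List.enumerate t (s + 2) = (PySem.List.enumerate t s).map (fun p => (p.1 + 2, p.2)) := by
  induction t generalizing s with
  | nil => simp [PySem.List.enumerate_nil]
  | cons x xs ih =>
      rw [PySem.List.enumerate_cons, PySem.List.enumerate_cons, List.map_cons]
      have : s + 2 + 1 = s + 1 + 2 := by ring
      rw [this, ih (s + 1)]

theorem evens_spec (xs : List Int) :
    ((PySem.List.enumerate xs 0).filter (fun p => PySem.Int.mod p.1 2 == 0)).map (·.2)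
      = evensOf xs := by
  induction xs using evensOf.induct with
  | case1 a b t ih =>
      rw [PySem.List.enumerate_cons, PySem.List.enumerate_cons,
        show (0:Int) + 1 + 1 = 0 + 2 by ring, enum_shift t 0,
        List.filter_cons_of_pos (by exact rfl),
        List.filter_cons_of_neg (by exact fun h => nomatch h),
        List.filter_map]
      have hpred : List.filter ((fun p => PySem.Int.mod p.1 2 == 0) ∘ fun p : Int × Int => (p.1 + 2, p.2))
            (PySem.List.enumerate t 0)
          = List.filter (fun p : Int × Int => PySem.Int.mod p.1 2 == 0) (PySem.List.enumerate t 0) := by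
        apply List.filter_congr
        intro p _
        simp
      rw [hpred, List.map_cons, List.map_map]
      have : ((fun x : Int × Int => x.2) ∘ fun p : Int × Int => (p.1 + 2, p.2))
          = (fun x : Int × Int => x.2) := rfl
      rw [this, ih]
      rfl
  | case2 a =>
      rw [PySem.List.enumerate_cons, PySem.List.enumerate_nil,
        List.filter_cons_of_pos (by exact rfl)]
      rfl
  | case3 => rfl

theorem odds_spec (xs : List Int) :
    ((PySem.List.enumerate xs 0).filter (fun p => PySem.Int.mod p.1 2 == 1)).map (·.2)
      = oddsOf xs := by
  induction xs using evensOf.induct with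
  | case1 a b t ih =>
      rw [PySem.List.enumerate_cons, PySem.List.enumerate_cons,
        show (0:Int) + 1 + 1 = 0 + 2 by ring, enum_shift t 0,
        List.filter_cons_of_neg (by exact fun h => nomatch h),
        List.filter_cons_of_pos (by exact rfl),
        List.filter_map]
      have hpred : List.filter ((fun p => PySem.Int.mod p.1 2 == 1) ∘ fun p : Int × Int => (p.1 + 2, p.2))
            (PySem.List.enumerate t 0)
          = List.filter (fun p : Int × Int => PySem.Int.mod p.1 2 == 1) (PySem.List.enumerate t 0) := by
        apply List.filter_congr
        intro p _
        simp
      rw [hpred, List.map_cons, List.map_map]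
      have : ((fun x : Int × Int => x.2) ∘ fun p : Int × Int => (p.1 + 2, p.2))
          = (fun x : Int × Int => x.2) := rfl
      rw [this, ih]
      rfl
  | case2 a =>
      rw [PySem.List.enumerate_cons, PySem.List.enumerate_nil,
        List.filter_cons_of_neg (by exact fun h => nomatch h)]
      rfl
  | case3 => rfl

theorem odometr_alt_eq_altB (xs : List Int) : odometr_alt xs = altB xs := by
  unfold odometr_alt altB
  simp only [evens_spec, odds_spec, PySem.List.slice_to_natCast, PySem.List.slice_from_one,
    dotP]

-- main bridge: A's generalized value against B's, induction two elements at a time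
theorem gOdo_eq_altB (xs : List Int) (prev : Int) :
    gOdo xs prev = altB xs - prev * fwt xs := by
  induction xs, prev using gOdo.induct with
  | case1 a b t prev ih =>
      match t with
      | [] =>
          simp only [gOdo, altB, evensOf, oddsOf, fwt, dotP]
          simp [List.zip]
          ring
      | [x] =>
          simp only [gOdo, altB, evensOf, oddsOf, fwt, dotP]
          simp [List.zip]
          ring
      | c :: d :: u =>
          have hA : gOdo (a :: b :: c :: d :: u) prev
              = a * (b - prev) + gOdo (c :: d :: u) b := rfl
          rw [hA, ih]
          have hE : evensOf (a :: b :: c :: d :: u) = a :: c :: evensOf u := rfl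
          have hO : oddsOf (a :: b :: c :: d :: u) = b :: d :: oddsOf u := rfl
          have hE2 : evensOf (c :: d :: u) = c :: evensOf u := rfl
          have hO2 : oddsOf (c :: d :: u) = d :: oddsOf u := rfl
          simp only [altB, hE, hO, hE2, hO2, fwt, List.length_cons, List.take_succ_cons,
            List.tail_cons, dotP, List.zip_cons_cons, List.map_cons, List.sum_cons]
          ring
  | case2 xs prev h =>
      match xs, h with
      | [], _ => simp [gOdo, altB, evensOf, oddsOf, dotP, fwt]
      | [x], _ => simp [gOdo, altB, evensOf, oddsOf, dotP, fwt]
      | w :: r :: t, h => exact absurd rfl (h w r t)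

-- A's fold, generalized over the value subtracted at the first hour
def FpOdo (xs : List Int) (prev : Int) : Int :=
  (PySem.List.pyRange 1 xs.length 2).foldl
    (fun acc h =>
      acc + PySem.List.pyGetD xs (h - 1) 0 *
        (PySem.List.pyGetD xs h 0 - (if h = 1 then prev else PySem.List.pyGetD xs (h - 2) 0))) 0

theorem odometr_eq_FpOdo (xs : List Int) : odometr xs = FpOdo xs 0 := by
  unfold odometr FpOdo
  apply PySem.List.foldl_congr_mem
  intro acc h _
  by_cases h1 : h = 1
  · simp [h1]
  · simp [h1]

theorem range2_shift (n : Nat) :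
    PySem.List.pyRange 1 ((n : Int) + 2) 2 =
      1 :: (PySem.List.pyRange 1 (n : Int) 2).map (· + 2) := by
  rw [PySem.List.pyRange_of_pos _ _ (by omega : (0:Int) < 2),
      PySem.List.pyRange_of_pos _ _ (by omega : (0:Int) < 2)]
  have hc1 : (if (1:Int) < (n:Int) + 2 then (((n:Int) + 2 - 1 + 2 - 1) / 2).toNat else 0)
      = n / 2 + 1 := by
    rw [if_pos (by omega)]
    omega
  have hc2 : (if (1:Int) < (n:Int) then (((n:Int) - 1 + 2 - 1) / 2).toNat else 0) = n / 2 := by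
    by_cases h : (1:Int) < (n:Int)
    · rw [if_pos h]; omega
    · rw [if_neg h]; omega
  rw [hc1, hc2, List.range_succ_eq_map, List.map_cons, List.map_map, List.map_map]
  congr 1

theorem pyGetD_cons_cons (w r : Int) (t : List Int) (i : Int) (hi : 0 ≤ i) (d : Int) :
    PySem.List.pyGetD (w :: r :: t) (i + 2) d = PySem.List.pyGetD t i d := by
  rw [PySem.List.pyGetD_of_nonneg _ _ (by omega), PySem.List.pyGetD_of_nonneg _ _ hi]
  have : (i + 2).toNat = i.toNat + 2 := by omega
  simp [this]

theorem FpOdo_eq_gOdo : ∀ (xs : List Int) (prev : Int), FpOdo xs prev = gOdo xs prev := by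
  intro xs prev
  induction xs, prev using gOdo.induct with
  | case1 w r t prev ih =>
      unfold FpOdo
      have hlen : (((w :: r :: t).length : Int)) = (t.length : Int) + 2 := by
        simp
        omega
      rw [hlen, range2_shift]
      rw [PySem.List.foldl_add _ (fun h => PySem.List.pyGetD (w :: r :: t) (h - 1) 0 *
        (PySem.List.pyGetD (w :: r :: t) h 0 - (if h = 1 then prev else
          PySem.List.pyGetD (w :: r :: t) (h - 2) 0))) 0]
      rw [List.map_cons, List.sum_cons, List.map_map]
      have hg1 : PySem.List.pyGetD (w :: r :: t) ((1:Int) - 1) 0 *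
          (PySem.List.pyGetD (w :: r :: t) 1 0 - (if (1:Int) = 1 then prev else
            PySem.List.pyGetD (w :: r :: t) ((1:Int) - 2) 0)) = w * (r - prev) := by
        norm_num [PySem.List.pyGetD_ofNat']
      rw [hg1]
      have hmap : List.map ((fun h => PySem.List.pyGetD (w :: r :: t) (h - 1) 0 *
            (PySem.List.pyGetD (w :: r :: t) h 0 - (if h = 1 then prev else
              PySem.List.pyGetD (w :: r :: t) (h - 2) 0))) ∘ (· + 2))
            (PySem.List.pyRange 1 (t.length : Int) 2)
          = List.map (fun h => PySem.List.pyGetD t (h - 1) 0 *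
            (PySem.List.pyGetD t h 0 - (if h = 1 then r else PySem.List.pyGetD t (h - 2) 0)))
            (PySem.List.pyRange 1 (t.length : Int) 2) := by
        apply List.map_congr_left
        intro h hmem
        have hh := (PySem.List.mem_pyRange_iff_of_pos (by omega : (0:Int) < 2) h).mp hmem
        have h1 : (1:Int) ≤ h := hh.1
        simp only [Function.comp]
        have hget1 : PySem.List.pyGetD (w :: r :: t) (h + 2 - 1) 0
            = PySem.List.pyGetD t (h - 1) 0 := by
          rw [show h + 2 - 1 = (h - 1) + 2 by ring]
          exact pyGetD_cons_cons w r t (h - 1) (by omega) 0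
        have hget2 : PySem.List.pyGetD (w :: r :: t) (h + 2) 0 = PySem.List.pyGetD t h 0 :=
          pyGetD_cons_cons w r t h (by omega) 0
        rw [hget1, hget2, if_neg (by omega : ¬ h + 2 = 1)]
        by_cases he : h = 1
        · subst he
          rw [if_pos rfl]
          norm_num [PySem.List.pyGetD_ofNat']
        · have h3 : (3:Int) ≤ h := by
            rcases hh.2.2 with ⟨c, hc⟩
            omega
          have hget3 : PySem.List.pyGetD (w :: r :: t) (h + 2 - 2) 0
              = PySem.List.pyGetD t (h - 2) 0 := by
            rw [show h + 2 - 2 = (h - 2) + 2 by ring]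
            exact pyGetD_cons_cons w r t (h - 2) (by omega) 0
          rw [hget3, if_neg he]
      rw [hmap, show gOdo (w :: r :: t) prev = w * (r - prev) + gOdo t r from rfl, ← ih]
      unfold FpOdo
      rw [PySem.List.foldl_add _ (fun h => PySem.List.pyGetD t (h - 1) 0 *
        (PySem.List.pyGetD t h 0 - (if h = 1 then r else PySem.List.pyGetD t (h - 2) 0))) 0]
      ring
  | case2 xs prev h =>
      match xs, h with
      | [], _ =>
          norm_num [FpOdo, gOdo,
            PySem.List.pyRange_of_pos 1 0 (show (0:Int) < 2 by omega)]
      | [x], _ =>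
          norm_num [FpOdo, gOdo,
            PySem.List.pyRange_of_pos 1 1 (show (0:Int) < 2 by omega)]
      | w :: r :: t, h => exact absurd rfl (h w r t)

-- ===== VERDICT (by name: the statement is the Claim_ definition above) =====
theorem odometr_spec : Claim_equal_odometr := by
  intro oksana _
  unfold Spec_odometr
  rw [odometr_eq_FpOdo, FpOdo_eq_gOdo, gOdo_eq_altB, odometr_alt_eq_altB]
  ring
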